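-- pv_equiv track=rewrite | github.com/Neeraj-kaushik/Data_Structures_python | Recursion Assingment/checkAB.py | checkAB
-- ===== SOURCE A (Python) =====
-- def checkAB(str1):
--     if len(str1) == 0:
--         return True
--     if len(str1) == 1:
--         if str1 == 'a':
--             return True
--         else:
--             return False
--     if str1[0] == 'a':
--         return checkAB(str1[1:])
--     elif str1[0] == 'b':
--         if str1[1] == 'b':
--             return checkAB(str1[2:])
--         else:
--             return False
--     else:
--         return False
-- ===== SOURCE B (Python) =====
-- def checkAB(str1):
--     i, n = 0, len(str1)
--     while i < n:
--         if str1[i] == 'a':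
--             i += 1
--         elif str1[i] == 'b' and i + 1 < n and str1[i + 1] == 'b':
--             i += 2
--         else:
--             return False
--     return True
-- ===== Notes on version B (the rewrite author's own statement) =====
-- stated objective: faster
-- what changed: Replaced A's slicing recursion (each step copies the remaining suffix) with a single forward pass moving an index pointer over the string, no copies.
import Mathlib
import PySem

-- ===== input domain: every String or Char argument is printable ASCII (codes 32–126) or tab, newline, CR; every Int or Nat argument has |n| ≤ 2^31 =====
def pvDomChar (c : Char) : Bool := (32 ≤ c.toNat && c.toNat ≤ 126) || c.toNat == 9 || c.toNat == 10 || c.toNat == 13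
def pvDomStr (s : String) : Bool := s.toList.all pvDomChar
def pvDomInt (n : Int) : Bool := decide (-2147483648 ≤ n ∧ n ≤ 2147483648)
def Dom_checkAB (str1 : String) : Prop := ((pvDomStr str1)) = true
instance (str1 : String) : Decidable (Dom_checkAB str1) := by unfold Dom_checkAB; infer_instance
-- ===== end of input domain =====

-- B replaces A's slicing recursion by one index-pointer pass (objective: faster, no suffix copies).

-- ===== PORT A =====
-- A's recursion on the string, transliterated over the code-point list (slices = PySem.List.slice).
def checkABgo (s : List Char) : Bool :=
  if s.length = 0 then true
  else if s.length = 1 then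
    (if s = ['a'] then true else false)
  else if PySem.List.pyGet? s 0 = some 'a' then
    checkABgo (PySem.List.slice s (some 1) none)
  else if PySem.List.pyGet? s 0 = some 'b' then
    (if PySem.List.pyGet? s 1 = some 'b' then
      checkABgo (PySem.List.slice s (some 2) none)
    else false)
  else false
termination_by s.length
decreasing_by
  · simp only [PySem.List.slice_from_one]; cases s with
    | nil => simp_all
    | cons a t => simp
  · rw [show ((2 : Int)) = ((2 : Nat) : Int) by norm_num, PySem.List.slice_from_natCast]
    simp; omega

def checkAB (str1 : String) : Bool := checkABgo str1.toList

-- ===== PORT B =====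
-- B's while loop: index i over the fixed list, i < n measure.
def checkABaltGo (s : List Char) (i : Nat) : Bool :=
  if i < s.length then
    if s[i]? = some 'a' then checkABaltGo s (i + 1)
    else if s[i]? = some 'b' ∧ i + 1 < s.length ∧ s[i + 1]? = some 'b' then
      checkABaltGo s (i + 2)
    else false
  else true
termination_by s.length - i

def checkAB_alt (str1 : String) : Bool := checkABaltGo str1.toList 0

-- ===== PRECONDITION & SPEC =====
def Spec_checkAB (str1 : String) (out : Bool) : Prop := out = checkAB_alt str1
instance (str1 : String) (out : Bool) : Decidable (Spec_checkAB str1 out) := by unfold Spec_checkAB; infer_instance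

-- ===== CLAIM (what is proved, stated in full; the proofs are below) =====
def Claim_equal_checkAB : Prop := ∀ (str1 : String), Dom_checkAB str1 → Spec_checkAB str1 (checkAB str1)

-- ===== LEMMAS AND PROOFS =====

-- Evaluation of A's recursion on a cons cell.
theorem go_cons (c : Char) (t : List Char) :
    checkABgo (c :: t) =
      if t = [] then decide (c = 'a')
      else if c = 'a' then checkABgo t
      else if c = 'b' then (if t[0]? = some 'b' then checkABgo t.tail else false)
      else false := by
  rw [checkABgo]
  have h2 : PySem.List.slice (c :: t) (some 2) none = t.tail := by
    rw [show ((2 : Int)) = ((2 : Nat) : Int) by norm_num, PySem.List.slice_from_natCast]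
    simp [List.drop_succ_cons, List.drop_one]
  simp [PySem.List.pyGet?, PySem.List.slice_from_one, h2, PySem.List.pyIdx?]
  rcases t with _ | ⟨d, t'⟩ <;> simp

theorem altGo_eq_go (s : List Char) (i : Nat) : checkABaltGo s i = checkABgo (s.drop i) := by
  fun_induction checkABaltGo s i with
  | case1 i h ha ih =>
      rw [List.drop_eq_getElem_cons h, go_cons]
      have hc : s[i] = 'a' := by rw [List.getElem?_eq_getElem h] at ha; exact Option.some.inj ha
      rw [ih]
      by_cases he : List.drop (i + 1) s = []
      · rw [he]; simp [hc, checkABgo]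
      · simp [he, hc]
  | case2 i h ha hb ih =>
      obtain ⟨hb0, hlt, hb1⟩ := hb
      rw [List.drop_eq_getElem_cons h, go_cons]
      have hc : s[i] = 'b' := by rw [List.getElem?_eq_getElem h] at hb0; exact Option.some.inj hb0
      have hne : List.drop (i + 1) s ≠ [] := by simp [List.drop_eq_nil_iff]; omega
      have h0 : (List.drop (i + 1) s)[0]? = some 'b' := by rw [List.getElem?_drop]; simpa using hb1
      have htail : (List.drop (i + 1) s).tail = List.drop (i + 2) s := by rw [List.tail_drop]
      simp [hne, hc, h0, htail, ih]
  | case3 i h ha hb =>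
      rw [List.drop_eq_getElem_cons h, go_cons]
      have ha' : s[i] ≠ 'a' := fun hx => ha (by rw [List.getElem?_eq_getElem h, hx])
      by_cases he : List.drop (i + 1) s = []
      · simp [he, ha']
      · by_cases hb' : s[i] = 'b'
        · have hlt : i + 1 < s.length := by
            rcases Nat.lt_or_ge (i + 1) s.length with h' | h'
            · exact h'
            · exact absurd (List.drop_eq_nil_of_le h') he
          have h1 : ¬ s[i + 1]? = some 'b' := fun hx =>
            hb ⟨by rw [List.getElem?_eq_getElem h, hb'], hlt, hx⟩
          simp [he, hb']
          exact fun hx => absurd hx h1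
        · simp [he, ha', hb']
  | case4 i h =>
      rw [List.drop_eq_nil_of_le (by omega)]
      simp [checkABgo]

-- ===== VERDICT (by name: the statement is the Claim_ definition above) =====
theorem checkAB_spec : Claim_equal_checkAB := by
  intro str1 _
  unfold Spec_checkAB checkAB checkAB_alt
  rw [altGo_eq_go]
  simp
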